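-- pv_equiv track=rewrite | github.com/andytsen/Coding-Practice | leetcode/easy/comp.py | getSmallestCharFreq
-- ===== SOURCE A (Python) =====
-- def getSmallestCharFreq(word):
--     counts = {}
--     for c in word:
--         if c not in counts:
--             counts[c] = 1
--         else:
--             counts[c] += 1
--     smallest_char = min(counts.keys())
--     return counts[smallest_char]
-- ===== SOURCE B (Python) =====
-- def getSmallestCharFreq(word):
--     run = sorted(word)
--     first = run[0]
--     n = 1
--     while n < len(run) and run[n] == first:
--         n += 1
--     return n
-- ===== Notes on version B (the rewrite author's own statement) =====
-- stated objective: alternative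
-- what changed: B replaces A's per-character frequency dictionary and min-over-keys by sort-then-scan: it sorts the characters, so the smallest character's occurrences form the leading run, and returns the length of that run measured by a single while loop.
import Mathlib
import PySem

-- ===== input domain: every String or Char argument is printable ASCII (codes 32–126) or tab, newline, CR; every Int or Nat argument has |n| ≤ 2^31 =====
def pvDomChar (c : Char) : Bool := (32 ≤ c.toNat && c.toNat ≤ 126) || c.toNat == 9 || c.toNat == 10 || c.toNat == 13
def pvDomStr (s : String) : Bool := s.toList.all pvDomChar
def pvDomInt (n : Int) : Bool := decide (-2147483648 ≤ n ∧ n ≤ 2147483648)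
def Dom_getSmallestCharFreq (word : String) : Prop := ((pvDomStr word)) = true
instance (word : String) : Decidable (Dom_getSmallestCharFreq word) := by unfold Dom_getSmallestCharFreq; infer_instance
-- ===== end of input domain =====

-- B replaces A's frequency dictionary by sort-then-scan: sort the characters and measure the leading run (return value unchanged; different algorithm, not claimed faster).


-- ===== PORT A =====
-- counts = {}; for c in word: if c not in counts: counts[c] = 1 else: counts[c] += 1
-- smallest_char = min(counts.keys()); return counts[smallest_char]
def getSmallestCharFreq (word : String) : Int :=
  let counts : PySem.Dict Char Int :=
    word.toList.foldl
      (fun d c => if d.contains c = false then d.insert c 1 else d.modify c 0 (· + 1))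
      PySem.Dict.empty
  match PySem.List.min? counts.keys (fun x => x) with
  | some smallest => (counts.get? smallest).getD 0   -- smallest is a key of counts whenever min? succeeds
  | none => 0                                        -- min() raised ValueError: outside Pre_

-- ===== PORT B =====
-- the while loop 'while n < len(run) and run[n] == first: n += 1', scanning run from index 1,
-- transcribed as structural recursion on the part of run after the current index
def pvRunScan (first : Char) : List Char → Int → Int
  | [], n => n
  | c :: rest, n => if c = first then pvRunScan first rest (n + 1) else n

-- run = sorted(word); first = run[0]; n = 1; while …: n += 1; return n
def getSmallestCharFreq_alt (word : String) : Int :=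
  match PySem.List.sorted word.toList (fun x => x) false with
  | [] => 0                                          -- run[0] raised IndexError: outside Pre_
  | first :: rest => pvRunScan first rest 1

-- ===== PRECONDITION & SPEC =====
-- Pre_ excludes only the empty string, on which A's min() raises ValueError (and B's run[0] an IndexError).
def Pre_getSmallestCharFreq (word : String) : Prop := word ≠ ""
instance (word : String) : Decidable (Pre_getSmallestCharFreq word) := by
  unfold Pre_getSmallestCharFreq; infer_instance
def pvWitness_getSmallestCharFreq : String := "ab"

def Spec_getSmallestCharFreq (word : String) (out : Int) : Prop := out = getSmallestCharFreq_alt word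
instance (word : String) (out : Int) : Decidable (Spec_getSmallestCharFreq word out) := by
  unfold Spec_getSmallestCharFreq; infer_instance

-- ===== CLAIM (what is proved, stated in full; the proofs are below) =====
def Claim_equal_getSmallestCharFreq : Prop := ∀ (word : String), Dom_getSmallestCharFreq word → Pre_getSmallestCharFreq word → Spec_getSmallestCharFreq word (getSmallestCharFreq word)

-- ===== LEMMAS AND PROOFS =====

-- Both branches of A's loop body insert getD+1 (on an absent key getD is the default 0).
theorem stepEqInsertGetD (d : PySem.Dict Char Int) (c : Char) :
    (if d.contains c = false then d.insert c 1 else d.modify c 0 (· + 1)) =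
      d.insert c (d.getD c 0 + 1) := by
  by_cases h : d.contains c = false
  · rw [if_pos h, PySem.Dict.getD_of_not_contains d 0 h]; norm_num
  · rw [if_neg h]; rfl

-- A's counting loop builds exactly Counter(word.toList).
theorem loopEqCounter (l : List Char) :
    l.foldl (fun d c => if d.contains c = false then d.insert c 1 else d.modify c 0 (· + 1))
      (PySem.Dict.empty : PySem.Dict Char Int) = PySem.Dict.counter l := by
  rw [← PySem.Dict.foldl_insert_getD_add_one_eq_counter]
  exact PySem.List.foldl_congr_mem l _ _ _ (fun d c _ => stepEqInsertGetD d c)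

-- On a ≤-sorted tail whose elements all dominate `first`, the run scan adds count of `first`.
theorem runScanEqCount (first : Char) : ∀ (rest : List Char) (n : Int),
    rest.Pairwise (· ≤ ·) → (∀ x ∈ rest, first ≤ x) →
    pvRunScan first rest n = n + (rest.count first : Int) := by
  intro rest
  induction rest with
  | nil => intro n _ _; simp [pvRunScan]
  | cons c t ih =>
      intro n hp hge
      rcases List.pairwise_cons.mp hp with ⟨hct, htp⟩
      by_cases hc : c = first
      · rw [pvRunScan, if_pos hc, ih (n + 1) htp (fun x hx => hge x (List.mem_cons_of_mem _ hx))]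
        subst hc
        simp [List.count_cons_self]
        ring
      · rw [pvRunScan, if_neg hc]
        have h0 : t.count first = 0 := by
          rw [List.count_eq_zero]
          intro hmem
          have hfc : first ≤ c := hge c (List.mem_cons_self)
          have hcf : c ≤ first := hct first hmem
          exact hc (le_antisymm hcf hfc)
        simp [hc, h0]

theorem mainEq (word : String) (h : word ≠ "") :
    getSmallestCharFreq word = getSmallestCharFreq_alt word := by
  unfold getSmallestCharFreq getSmallestCharFreq_alt
  have hl : word.toList ≠ [] := by
    intro e; exact h (by rwa [← String.toList_eq_nil_iff])
  rw [loopEqCounter]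
  simp only [PySem.Dict.keys_counter]
  rcases hs : PySem.List.sorted word.toList (fun x => x) false with _ | ⟨first, rest⟩
  · exact absurd ((PySem.List.sorted_eq_nil_iff _ _ _).mp hs) hl
  · rcases hm : PySem.List.min? (PySem.Set.ofList word.toList) (fun x => x) with _ | m
    · exfalso
      rcases List.exists_mem_of_ne_nil word.toList hl with ⟨x, hx⟩
      have hxs : x ∈ PySem.Set.ofList word.toList := (PySem.Set.mem_ofList _ _).mpr hx
      rw [PySem.List.min?_eq_none_iff] at hm
      simp [hm] at hxs
    · -- the head of the sorted list is the minimum of the distinct keys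
      have hperm : (first :: rest).Perm word.toList := hs ▸ PySem.List.sorted_perm _ _ _
      have hfirstmem : first ∈ word.toList := hperm.mem_iff.mp (List.mem_cons_self)
      have hmmem : m ∈ word.toList := (PySem.Set.mem_ofList _ _).mp (PySem.List.min?_mem hm)
      have hmf : m = first := by
        have h1 : m ≤ first :=
          PySem.List.min?_isMin hm _ ((PySem.Set.mem_ofList _ _).mpr hfirstmem)
        have h2 : first ≤ m := PySem.List.key_head_sorted_le word.toList (fun x => x) hs m hmmem
        exact le_antisymm h1 h2
      subst hmf
      simp only []
      -- A's side: counter lookup is List.count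
      rw [show ((PySem.Dict.counter word.toList).get? m).getD 0 =
            (PySem.Dict.counter word.toList).getD m 0 from rfl]
      rw [PySem.Dict.getD_counter]
      -- B's side: run scan over the sorted tail
      have hpw : (m :: rest).Pairwise (· ≤ ·) := by
        have := PySem.List.sorted_pairwise word.toList (fun x => x) (κ := Char)
        rw [hs] at this; exact this
      rcases List.pairwise_cons.mp hpw with ⟨hdom, htp⟩
      rw [runScanEqCount m rest 1 htp hdom]
      have hcnt : word.toList.count m = (m :: rest).count m := (hperm.count_eq m).symm
      rw [hcnt, List.count_cons_self]
      push_cast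
      ring

-- ===== VERDICT (by name: the statement is the Claim_ definition above) =====
theorem getSmallestCharFreq_spec : Claim_equal_getSmallestCharFreq := by
  intro word _ hpre
  unfold Spec_getSmallestCharFreq
  exact mainEq word hpre
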